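-- pv_equiv track=rewrite | github.com/wyk18703232953/myResearch | codeComplex/data/filteredData/python/linear/python_linear_0036.py | solve
-- ===== SOURCE A (Python) =====
-- def steps(start, target):
--     ans = 0
--     for i, v in enumerate(start):
--         u = target[i]
--         if v != u:
--             for j in range(i + 1, len(start)):
--                 a, b = start[j], target[j]
--                 if a != b and a == u:
--                     start[i], start[j] = start[j], start[i]
--                     break
--             ans += 1
--     return ans
--
-- def solve(seq):
--     hc = seq.count('H')
--     tc = len(seq) - hc
--     ans = float('inf')
--     for i in range(tc + 1):
--         s = ['T'] * i + ['H'] * hc + ['T'] * (tc - i)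
--         ans = min(steps(seq.copy(), s), ans)
--     for i in range(hc + 1):
--         s = ['H'] * i + ['T'] * tc + ['H'] * (hc - i)
--         ans = min(steps(seq.copy(), s), ans)
--     return ans
-- ===== SOURCE B (Python) =====
-- # One-pass lazy-matching reimplementation: instead of copying the sequence and repeatedly
-- # scanning forward to perform swaps, each target is costed in a single zip pass with two
-- # FIFO queues of pending fixes (symbols an earlier fix would have swapped into this slot).
-- from collections import deque
--
-- def _cost(seq, target):
--     pending = {'H': deque(), 'T': deque()}
--     ans = 0
--     for v, u in zip(seq, target):
--         if v == u:
--             continue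
--         q = pending.get(v)
--         if q:
--             v = q.popleft()       # an earlier fix dropped this symbol here
--             if v == u:
--                 continue
--         ans += 1
--         pending[u].append(v)
--     return ans
--
-- def solve(seq):
--     n = len(seq)
--     hc = sum(c == 'H' for c in seq)
--     tc = n - hc
--     best = min(_cost(seq, ['T'] * i + ['H'] * hc + ['T'] * (tc - i)) for i in range(tc + 1))
--     return min(best, min(_cost(seq, ['H'] * i + ['T'] * tc + ['H'] * (hc - i)) for i in range(hc + 1)))
-- ===== Notes on version B (the rewrite author's own statement) =====
-- stated objective: faster
-- what changed: Each block target is costed in a single zip pass with two FIFO queues of pending fixes (the symbol an earlier swap would have dropped into a slot), instead of copying the sequence and rescanning it forward for a swap partner at every mismatch; the try-all-targets outer loop stays, so the whole computation drops from cubic to quadratic.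
import Mathlib
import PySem

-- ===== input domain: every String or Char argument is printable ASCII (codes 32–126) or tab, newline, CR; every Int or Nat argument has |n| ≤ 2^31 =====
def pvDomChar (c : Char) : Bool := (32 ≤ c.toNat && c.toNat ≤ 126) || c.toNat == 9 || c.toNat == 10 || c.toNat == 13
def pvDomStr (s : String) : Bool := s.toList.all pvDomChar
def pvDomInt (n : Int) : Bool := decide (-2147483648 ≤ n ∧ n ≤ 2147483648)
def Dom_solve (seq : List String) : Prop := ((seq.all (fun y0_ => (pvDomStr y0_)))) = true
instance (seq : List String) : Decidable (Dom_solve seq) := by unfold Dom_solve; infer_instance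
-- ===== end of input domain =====

-- B costs each block target in one zip pass with two FIFO queues of pending fixes instead
-- of copying the sequence and rescanning it for every swap; same results on every input.

-- ===== PORT A =====
-- inner 'for j in range(i+1, len(start))' of steps: first pair with a != b and a == u
def stepsFind (u : String) : List (String × String) → Option Nat
  | [] => none
  | (a, b) :: rest => if a ≠ b ∧ a = u then some 0 else (stepsFind u rest).map (· + 1)

-- the 'for i, v in enumerate(start)' loop of steps, consuming start/target head-wise
-- (the swap writes positions i and j ≥ i+1 only, so a head recursion is exact;
--  the [] target branch is Python's IndexError, unreachable from solve where lengths agree)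
def stepsGo : List String → List String → Int
  | [], _ => 0
  | _ :: _, [] => 0
  | v :: rest, u :: tt =>
    if v ≠ u then
      match stepsFind u (rest.zip tt) with
      | some j => 1 + stepsGo (rest.set j v) tt
      | none => 1 + stepsGo rest tt
    else stepsGo rest tt
termination_by start _ => start.length
decreasing_by all_goals simp

def solve (seq : List String) : Int :=
  let hc := seq.count "H"
  let tc := seq.length - hc
  let ans1 := (List.range (tc + 1)).foldl (fun ans i =>
      let s := List.replicate i "T" ++ List.replicate hc "H" ++ List.replicate (tc - i) "T"
      let c := stepsGo seq s
      match ans with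
      | none => some c
      | some m => some (min c m)) (none : Option Int)
  let ans2 := (List.range (hc + 1)).foldl (fun ans i =>
      let s := List.replicate i "H" ++ List.replicate tc "T" ++ List.replicate (hc - i) "H"
      let c := stepsGo seq s
      match ans with
      | none => some c
      | some m => some (min c m)) ans1
  ans2.getD 0   -- ans is always set: both ranges are nonempty

-- ===== PORT B =====
-- sum(c == 'H' for c in seq)
def bCount (seq : List String) : Nat :=
  seq.foldl (fun acc c => acc + (if c = "H" then 1 else 0)) 0

-- Python's min over a nonempty list; the [] case is Python's ValueError, unreachable here
-- (both generators range over a nonempty range)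
def pyMin (l : List Int) : Int :=
  match l with
  | [] => 0
  | x :: xs => xs.foldl min x

-- the body of _cost's 'for v, u in zip(seq, target)' loop; deques are lists, front first
-- (pending.get(v) is falsy for a missing key or an empty deque — the '| _' branch)
def costStep (st : PySem.Dict String (List String) × Int) (vu : String × String) :
    PySem.Dict String (List String) × Int :=
  if vu.1 = vu.2 then st
  else
    match st.1.get? vu.1 with
    | some (w :: rest) =>
        let pending := st.1.insert vu.1 rest     -- q.popleft()
        if w = vu.2 then (pending, st.2)
        else (pending.modify vu.2 [] (fun l => l ++ [w]), st.2 + 1)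
    | _ => (st.1.modify vu.2 [] (fun l => l ++ [vu.1]), st.2 + 1)

def cost (seq target : List String) : Int :=
  ((seq.zip target).foldl costStep
    ((PySem.Dict.empty.insert "H" []).insert "T" [], (0 : Int))).2

def solve_alt (seq : List String) : Int :=
  let n := seq.length
  let hc := bCount seq
  let tc := n - hc
  let best := pyMin ((List.range (tc + 1)).map (fun i =>
      cost seq (List.replicate i "T" ++ List.replicate hc "H" ++ List.replicate (tc - i) "T")))
  min best (pyMin ((List.range (hc + 1)).map (fun i =>
      cost seq (List.replicate i "H" ++ List.replicate tc "T" ++ List.replicate (hc - i) "H"))))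

-- ===== PRECONDITION & SPEC =====
def Spec_solve (seq : List String) (out : Int) : Prop := out = solve_alt seq
instance (seq : List String) (out : Int) : Decidable (Spec_solve seq out) := by unfold Spec_solve; infer_instance

-- ===== CLAIM (what is proved, stated in full; the proofs are below) =====
def Claim_equal_solve : Prop := ∀ (seq : List String), Dom_solve seq → Spec_solve seq (solve seq)

-- ===== LEMMAS AND PROOFS =====

-- queue-pair mirror of the dict state: pending = {"H": qH, "T": qT}
def pushQ (qH qT : List String) (u x : String) : List String × List String :=
  if u = "H" then (qH ++ [x], qT) else (qH, qT ++ [x])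

def pairFold : List (String × String) → List String → List String → Int
  | [], _, _ => 0
  | (v, u) :: l, qH, qT =>
    if v = u then pairFold l qH qT
    else if v = "H" then
      match qH with
      | w :: q => if w = u then pairFold l q qT
                  else 1 + pairFold l (pushQ q qT u w).1 (pushQ q qT u w).2
      | [] => 1 + pairFold l (pushQ qH qT u v).1 (pushQ qH qT u v).2
    else if v = "T" then
      match qT with
      | w :: q => if w = u then pairFold l qH q
                  else 1 + pairFold l (pushQ qH q u w).1 (pushQ qH q u w).2
      | [] => 1 + pairFold l (pushQ qH qT u v).1 (pushQ qH qT u v).2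
    else 1 + pairFold l (pushQ qH qT u v).1 (pushQ qH qT u v).2

-- the dict fold computes pairFold
theorem cost_eq_pairFold : ∀ (l : List (String × String)) (qH qT : List String) (ans : Int),
    (∀ p ∈ l, p.2 = "H" ∨ p.2 = "T") →
    (l.foldl costStep (PySem.Dict.mk [("H", qH), ("T", qT)], ans)).2
      = ans + pairFold l qH qT := by
  intro l
  induction l with
  | nil => intro qH qT ans _; simp [pairFold]
  | cons p l ih =>
    intro qH qT ans hbin
    obtain ⟨v, u⟩ := p
    have hu : u = "H" ∨ u = "T" := hbin (v, u) (by simp)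
    have hbin' : ∀ p ∈ l, p.2 = "H" ∨ p.2 = "T" := fun p hp => hbin p (List.mem_cons_of_mem _ hp)
    simp only [List.foldl_cons]
    by_cases hvu : v = u
    · simp only [costStep, if_pos hvu, pairFold]
      exact ih qH qT ans hbin'
    · rcases hu with hu | hu <;> subst hu
      · -- u = "H", v ≠ "H"
        by_cases hvT : v = "T"
        · subst hvT
          cases qT with
          | nil =>
            have hstep : costStep (PySem.Dict.mk [("H", qH), ("T", [])], ans) ("T", "H")
                = (PySem.Dict.mk [("H", qH ++ ["T"]), ("T", [])], ans + 1) := by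
              simp [costStep, PySem.Dict.modify,
                PySem.Dict.insert, PySem.Dict.getD, PySem.Dict.get?]
            rw [hstep, ih _ _ _ hbin']
            simp [pairFold, pushQ]
            omega
          | cons w q =>
            by_cases hw : w = "H"
            · subst hw
              have hstep : costStep (PySem.Dict.mk [("H", qH), ("T", "H" :: q)], ans) ("T", "H")
                  = (PySem.Dict.mk [("H", qH), ("T", q)], ans) := by
                simp [costStep, PySem.Dict.get?_mk_cons, PySem.Dict.insert]
              rw [hstep, ih _ _ _ hbin']
              simp [pairFold]
            · have hstep : costStep (PySem.Dict.mk [("H", qH), ("T", w :: q)], ans) ("T", "H")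
                  = (PySem.Dict.mk [("H", qH ++ [w]), ("T", q)], ans + 1) := by
                simp [costStep, hw, PySem.Dict.modify,
                  PySem.Dict.insert, PySem.Dict.getD, PySem.Dict.get?]
              rw [hstep, ih _ _ _ hbin']
              simp [pairFold, pushQ, hw]
              omega
        · -- v neither "H" nor "T": pending.get(v) is None
          have hHv : ("H" == v) = false := beq_eq_false_iff_ne.mpr (fun h => hvu h.symm)
          have hTv : ("T" == v) = false := beq_eq_false_iff_ne.mpr (fun h => hvT h.symm)
          have hstep : costStep (PySem.Dict.mk [("H", qH), ("T", qT)], ans) (v, "H")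
              = (PySem.Dict.mk [("H", qH ++ [v]), ("T", qT)], ans + 1) := by
            simp [costStep, hvu, hHv, hTv, PySem.Dict.get?, List.find?, PySem.Dict.modify,
              PySem.Dict.insert, PySem.Dict.getD]
          rw [hstep, ih _ _ _ hbin']
          simp [pairFold, pushQ, hvu, hvT]
          omega
      · -- u = "T", v ≠ "T"
        by_cases hvH : v = "H"
        · subst hvH
          cases qH with
          | nil =>
            have hstep : costStep (PySem.Dict.mk [("H", []), ("T", qT)], ans) ("H", "T")
                = (PySem.Dict.mk [("H", []), ("T", qT ++ ["H"])], ans + 1) := by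
              simp [costStep, PySem.Dict.modify,
                PySem.Dict.insert, PySem.Dict.getD, PySem.Dict.get?]
            rw [hstep, ih _ _ _ hbin']
            simp [pairFold, pushQ]
            omega
          | cons w q =>
            by_cases hw : w = "T"
            · subst hw
              have hstep : costStep (PySem.Dict.mk [("H", "T" :: q), ("T", qT)], ans) ("H", "T")
                  = (PySem.Dict.mk [("H", q), ("T", qT)], ans) := by
                simp [costStep, PySem.Dict.get?_mk_cons, PySem.Dict.insert]
              rw [hstep, ih _ _ _ hbin']
              simp [pairFold]
            · have hstep : costStep (PySem.Dict.mk [("H", w :: q), ("T", qT)], ans) ("H", "T")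
                  = (PySem.Dict.mk [("H", q), ("T", qT ++ [w])], ans + 1) := by
                simp [costStep, hw, PySem.Dict.modify,
                  PySem.Dict.insert, PySem.Dict.getD, PySem.Dict.get?]
              rw [hstep, ih _ _ _ hbin']
              simp [pairFold, pushQ, hw]
              omega
        · have hHv : ("H" == v) = false := beq_eq_false_iff_ne.mpr (fun h => hvH h.symm)
          have hTv : ("T" == v) = false := beq_eq_false_iff_ne.mpr (fun h => hvu h.symm)
          have hstep : costStep (PySem.Dict.mk [("H", qH), ("T", qT)], ans) (v, "T")
              = (PySem.Dict.mk [("H", qH), ("T", qT ++ [v])], ans + 1) := by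
            simp [costStep, hvu, hHv, hTv, PySem.Dict.get?, List.find?, PySem.Dict.modify,
              PySem.Dict.insert, PySem.Dict.getD]
          rw [hstep, ih _ _ _ hbin']
          simp [pairFold, pushQ, hvH, hvu]
          omega

-- the current working list of A's simulation: the original suffix with the pending
-- replacements applied lazily (queue fronts land at the next mismatched H/T positions)
def lazyApply : List String → List String → List String → List String → List String
  | _, _, [], _ => []
  | _, _, v :: τ, [] => v :: τ
  | qH, qT, v :: τ, u :: t =>
    if v = u then v :: lazyApply qH qT τ t
    else if v = "H" then
      match qH with
      | w :: q => w :: lazyApply q qT τ t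
      | [] => v :: lazyApply qH qT τ t
    else if v = "T" then
      match qT with
      | w :: q => w :: lazyApply qH q τ t
      | [] => v :: lazyApply qH qT τ t
    else v :: lazyApply qH qT τ t

theorem lazyApply_nil_nil : ∀ (τ t : List String), lazyApply [] [] τ t = τ := by
  intro τ
  induction τ with
  | nil => intro t; cases t <;> rfl
  | cons v τ ih =>
    intro t
    cases t with
    | nil => rfl
    | cons u t =>
      simp only [lazyApply]
      split_ifs <;> simp [ih]

-- A's forward scan for a misplaced "T" hits exactly the position that serves the
-- appended queue entry (or no position, and the entry is never served)
theorem find_T : ∀ (τ t qH qT : List String) (w : String),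
    (∀ x ∈ t, x = "H" ∨ x = "T") → (∀ x ∈ qH, x ≠ "H") → (∀ x ∈ qT, x ≠ "T") →
    (stepsFind "T" ((lazyApply qH qT τ t).zip t) = none ∧
      lazyApply qH (qT ++ [w]) τ t = lazyApply qH qT τ t)
    ∨ (∃ j, stepsFind "T" ((lazyApply qH qT τ t).zip t) = some j ∧
      lazyApply qH (qT ++ [w]) τ t = (lazyApply qH qT τ t).set j w) := by
  intro τ
  induction τ with
  | nil => intro t qH qT w _ _ _; left; simp [lazyApply, stepsFind]
  | cons v τ ih =>
    intro t qH qT w ht hH hT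
    cases t with
    | nil => left; simp [lazyApply, stepsFind]
    | cons u t =>
      have hu : u = "H" ∨ u = "T" := ht u (by simp)
      have ht' : ∀ x ∈ t, x = "H" ∨ x = "T" := fun x hx => ht x (List.mem_cons_of_mem _ hx)
      by_cases hvu : v = u
      · -- matched head: the scan skips it
        have hσ : ∀ qT', lazyApply qH qT' (v :: τ) (u :: t) = v :: lazyApply qH qT' τ t := by
          intro qT'; simp [lazyApply, hvu]
        have hcond : ¬(v ≠ u ∧ v = "T") := by tauto
        rcases ih t qH qT w ht' hH hT with ⟨hf, he⟩ | ⟨j, hf, he⟩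
        · left
          refine ⟨?_, by rw [hσ, hσ, he]⟩
          rw [hσ]
          simp [stepsFind, hcond, hf]
        · right
          refine ⟨j + 1, ?_, ?_⟩
          · rw [hσ]
            simp [stepsFind, hcond, hf]
          · rw [hσ, hσ, he, List.set_cons_succ]
      · have hv3 : v = "H" ∨ v = "T" ∨ (¬v = "H" ∧ ¬v = "T") := by tauto
        rcases hv3 with hv | hv | hv
        · -- v = "H" mismatched: served from qH (or kept); never a "T"-hit
          subst hv
          have huT : u = "T" := by rcases hu with h | h; exacts [absurd h.symm hvu, h]
          subst huT
          cases qH with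
          | nil =>
            have hσ : ∀ qT', lazyApply [] qT' ("H" :: τ) ("T" :: t) = "H" :: lazyApply [] qT' τ t := by
              intro qT'; simp [lazyApply, hvu]
            have hcond : ¬(("H" : String) ≠ "T" ∧ ("H" : String) = "T") := by simp
            rcases ih t [] qT w ht' hH hT with ⟨hf, he⟩ | ⟨j, hf, he⟩
            · left
              refine ⟨?_, by rw [hσ, hσ, he]⟩
              rw [hσ]; simp [stepsFind, hf]
            · right
              refine ⟨j + 1, ?_, by rw [hσ, hσ, he, List.set_cons_succ]⟩
              rw [hσ]; simp [stepsFind, hf]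
          | cons w' q =>
            have hw' : w' ≠ "H" := hH w' (by simp)
            have hH' : ∀ x ∈ q, x ≠ "H" := fun x hx => hH x (List.mem_cons_of_mem _ hx)
            have hσ : ∀ qT', lazyApply (w' :: q) qT' ("H" :: τ) ("T" :: t)
                = w' :: lazyApply q qT' τ t := by
              intro qT'; simp [lazyApply, hvu]
            have hcond : ¬(w' ≠ "T" ∧ w' = "T") := by tauto
            rcases ih t q qT w ht' hH' hT with ⟨hf, he⟩ | ⟨j, hf, he⟩
            · left
              refine ⟨?_, by rw [hσ, hσ, he]⟩
              rw [hσ]; simp [stepsFind, hcond, hf]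
            · right
              refine ⟨j + 1, ?_, by rw [hσ, hσ, he, List.set_cons_succ]⟩
              rw [hσ]; simp [stepsFind, hcond, hf]
        · -- v = "T" mismatched
          subst hv
          cases qT with
          | nil =>
            -- the scan hits this very position
            right
            refine ⟨0, ?_, ?_⟩
            · simp [lazyApply, hvu, stepsFind]
            · simp [lazyApply, hvu]
          | cons w' q =>
            have hw' : w' ≠ "T" := hT w' (by simp)
            have hT' : ∀ x ∈ q, x ≠ "T" := fun x hx => hT x (List.mem_cons_of_mem _ hx)
            have hσ : ∀ q', lazyApply qH (w' :: q') ("T" :: τ) (u :: t)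
                = w' :: lazyApply qH q' τ t := by
              intro q'; simp [lazyApply, hvu]
            have hcond : ¬(w' ≠ u ∧ w' = "T") := by tauto
            rcases ih t qH q w ht' hH hT' with ⟨hf, he⟩ | ⟨j, hf, he⟩
            · left
              refine ⟨?_, ?_⟩
              · rw [hσ]; simp [stepsFind, hcond, hf]
              · rw [hσ, List.cons_append, hσ, he]
            · right
              refine ⟨j + 1, ?_, ?_⟩
              · rw [hσ]; simp [stepsFind, hcond, hf]
              · rw [hσ, List.cons_append, hσ, he, List.set_cons_succ]
        · -- v outside the alphabet: never served, never a hit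
          obtain ⟨hv1, hv2⟩ := hv
          have hσ : ∀ qT', lazyApply qH qT' (v :: τ) (u :: t) = v :: lazyApply qH qT' τ t := by
            intro qT'; simp [lazyApply, hvu, hv1, hv2]
          have hcond : ¬(v ≠ u ∧ v = "T") := by tauto
          rcases ih t qH qT w ht' hH hT with ⟨hf, he⟩ | ⟨j, hf, he⟩
          · left
            refine ⟨?_, by rw [hσ, hσ, he]⟩
            rw [hσ]; simp [stepsFind, hcond, hf]
          · right
            refine ⟨j + 1, ?_, by rw [hσ, hσ, he, List.set_cons_succ]⟩
            rw [hσ]; simp [stepsFind, hcond, hf]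

theorem find_H : ∀ (τ t qH qT : List String) (w : String),
    (∀ x ∈ t, x = "H" ∨ x = "T") → (∀ x ∈ qH, x ≠ "H") → (∀ x ∈ qT, x ≠ "T") →
    (stepsFind "H" ((lazyApply qH qT τ t).zip t) = none ∧
      lazyApply (qH ++ [w]) qT τ t = lazyApply qH qT τ t)
    ∨ (∃ j, stepsFind "H" ((lazyApply qH qT τ t).zip t) = some j ∧
      lazyApply (qH ++ [w]) qT τ t = (lazyApply qH qT τ t).set j w) := by
  intro τ
  induction τ with
  | nil => intro t qH qT w _ _ _; left; simp [lazyApply, stepsFind]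
  | cons v τ ih =>
    intro t qH qT w ht hH hT
    cases t with
    | nil => left; simp [lazyApply, stepsFind]
    | cons u t =>
      have hu : u = "H" ∨ u = "T" := ht u (by simp)
      have ht' : ∀ x ∈ t, x = "H" ∨ x = "T" := fun x hx => ht x (List.mem_cons_of_mem _ hx)
      by_cases hvu : v = u
      · -- matched head: the scan skips it
        have hσ : ∀ qH', lazyApply qH' qT (v :: τ) (u :: t) = v :: lazyApply qH' qT τ t := by
          intro qH'; simp [lazyApply, hvu]
        have hcond : ¬(v ≠ u ∧ v = "H") := by tauto
        rcases ih t qH qT w ht' hH hT with ⟨hf, he⟩ | ⟨j, hf, he⟩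
        · left
          refine ⟨?_, by rw [hσ, hσ, he]⟩
          rw [hσ]
          simp [stepsFind, hcond, hf]
        · right
          refine ⟨j + 1, ?_, ?_⟩
          · rw [hσ]
            simp [stepsFind, hcond, hf]
          · rw [hσ, hσ, he, List.set_cons_succ]
      · have hv3 : v = "T" ∨ v = "H" ∨ (¬v = "H" ∧ ¬v = "T") := by tauto
        rcases hv3 with hv | hv | hv
        · -- v = "T" mismatched: served from qT (or kept); never an "H"-hit
          subst hv
          have huH : u = "H" := by rcases hu with h | h; exacts [h, absurd h.symm hvu]
          subst huH
          cases qT with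
          | nil =>
            have hσ : ∀ qH', lazyApply qH' [] ("T" :: τ) ("H" :: t) = "T" :: lazyApply qH' [] τ t := by
              intro qH'; simp [lazyApply, hvu]
            have hcond : ¬(("T" : String) ≠ "H" ∧ ("T" : String) = "H") := by simp
            rcases ih t qH [] w ht' hH hT with ⟨hf, he⟩ | ⟨j, hf, he⟩
            · left
              refine ⟨?_, by rw [hσ, hσ, he]⟩
              rw [hσ]; simp [stepsFind, hf]
            · right
              refine ⟨j + 1, ?_, by rw [hσ, hσ, he, List.set_cons_succ]⟩
              rw [hσ]; simp [stepsFind, hf]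
          | cons w' q =>
            have hw' : w' ≠ "T" := hT w' (by simp)
            have hT' : ∀ x ∈ q, x ≠ "T" := fun x hx => hT x (List.mem_cons_of_mem _ hx)
            have hσ : ∀ qH', lazyApply qH' (w' :: q) ("T" :: τ) ("H" :: t)
                = w' :: lazyApply qH' q τ t := by
              intro qH'; simp [lazyApply, hvu]
            have hcond : ¬(w' ≠ "H" ∧ w' = "H") := by tauto
            rcases ih t qH q w ht' hH hT' with ⟨hf, he⟩ | ⟨j, hf, he⟩
            · left
              refine ⟨?_, by rw [hσ, hσ, he]⟩
              rw [hσ]; simp [stepsFind, hcond, hf]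
            · right
              refine ⟨j + 1, ?_, by rw [hσ, hσ, he, List.set_cons_succ]⟩
              rw [hσ]; simp [stepsFind, hcond, hf]
        · -- v = "H" mismatched
          subst hv
          cases qH with
          | nil =>
            -- the scan hits this very position
            right
            refine ⟨0, ?_, ?_⟩
            · simp [lazyApply, hvu, stepsFind]
            · simp [lazyApply, hvu]
          | cons w' q =>
            have hw' : w' ≠ "H" := hH w' (by simp)
            have hH' : ∀ x ∈ q, x ≠ "H" := fun x hx => hH x (List.mem_cons_of_mem _ hx)
            have hσ : ∀ q', lazyApply (w' :: q') qT ("H" :: τ) (u :: t)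
                = w' :: lazyApply q' qT τ t := by
              intro q'; simp [lazyApply, hvu]
            have hcond : ¬(w' ≠ u ∧ w' = "H") := by tauto
            rcases ih t q qT w ht' hH' hT with ⟨hf, he⟩ | ⟨j, hf, he⟩
            · left
              refine ⟨?_, ?_⟩
              · rw [hσ]; simp [stepsFind, hcond, hf]
              · rw [hσ, List.cons_append, hσ, he]
            · right
              refine ⟨j + 1, ?_, ?_⟩
              · rw [hσ]; simp [stepsFind, hcond, hf]
              · rw [hσ, List.cons_append, hσ, he, List.set_cons_succ]
        · -- v outside the alphabet: never served, never a hit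
          obtain ⟨hv1, hv2⟩ := hv
          have hσ : ∀ qH', lazyApply qH' qT (v :: τ) (u :: t) = v :: lazyApply qH' qT τ t := by
            intro qH'; simp [lazyApply, hvu, hv1, hv2]
          have hcond : ¬(v ≠ u ∧ v = "H") := by tauto
          rcases ih t qH qT w ht' hH hT with ⟨hf, he⟩ | ⟨j, hf, he⟩
          · left
            refine ⟨?_, by rw [hσ, hσ, he]⟩
            rw [hσ]; simp [stepsFind, hcond, hf]
          · right
            refine ⟨j + 1, ?_, by rw [hσ, hσ, he, List.set_cons_succ]⟩
            rw [hσ]; simp [stepsFind, hcond, hf]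

-- MAIN: A's swap simulation from any lazily-represented state = B's queue pass
theorem stepsGo_eq_pairFold : ∀ (τ t qH qT : List String),
    (∀ x ∈ t, x = "H" ∨ x = "T") → (∀ x ∈ qH, x ≠ "H") → (∀ x ∈ qT, x ≠ "T") →
    stepsGo (lazyApply qH qT τ t) t = pairFold (τ.zip t) qH qT := by
  intro τ
  induction τ with
  | nil => intro t qH qT _ _ _; simp [lazyApply, stepsGo, pairFold]
  | cons v τ ih =>
    intro t qH qT ht hH hT
    cases t with
    | nil => simp [lazyApply, stepsGo, pairFold]
    | cons u t =>
      have hu : u = "H" ∨ u = "T" := ht u (by simp)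
      have ht' : ∀ x ∈ t, x = "H" ∨ x = "T" := fun x hx => ht x (List.mem_cons_of_mem _ hx)
      by_cases hvu : v = u
      · subst hvu
        have hσ : lazyApply qH qT (v :: τ) (v :: t) = v :: lazyApply qH qT τ t := by
          simp [lazyApply]
        rw [hσ, stepsGo, if_neg (by simp)]
        simp only [List.zip_cons_cons, pairFold]
        exact ih t qH qT ht' hH hT
      · have hv3 : v = "H" ∨ v = "T" ∨ (¬v = "H" ∧ ¬v = "T") := by tauto
        rcases hv3 with hv | hv | hv
        · -- v = "H" mismatched, so u = "T": the pop seeks a misplaced "T"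
          subst hv
          have huT : u = "T" := by rcases hu with h | h; exacts [absurd h.symm hvu, h]
          subst huT
          cases qH with
          | nil =>
            have hqT' : ∀ x ∈ qT ++ ["H"], x ≠ "T" := by
              intro x hx
              rcases List.mem_append.mp hx with hx | hx
              · exact hT x hx
              · simp at hx; subst hx; simp
            have hσ : lazyApply [] qT ("H" :: τ) ("T" :: t) = "H" :: lazyApply [] qT τ t := by
              simp [lazyApply, hvu]
            rw [hσ, stepsGo, if_pos (by simp)]
            have hrhs : pairFold (("H" :: τ).zip ("T" :: t)) [] qT
                = 1 + pairFold (τ.zip t) [] (qT ++ ["H"]) := by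
              simp [pairFold, pushQ]
            rw [hrhs]
            rcases find_T τ t [] qT "H" ht' (by simp) hT with ⟨hf, he⟩ | ⟨j, hf, he⟩
            · rw [hf]
              show (1 : Int) + stepsGo (lazyApply [] qT τ t) t = _
              rw [← he, ih t [] (qT ++ ["H"]) ht' (by simp) hqT']
            · rw [hf]
              show (1 : Int) + stepsGo ((lazyApply [] qT τ t).set j "H") t = _
              rw [← he, ih t [] (qT ++ ["H"]) ht' (by simp) hqT']
          | cons w q =>
            have hw : w ≠ "H" := hH w (by simp)
            have hH' : ∀ x ∈ q, x ≠ "H" := fun x hx => hH x (List.mem_cons_of_mem _ hx)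
            have hσ : lazyApply (w :: q) qT ("H" :: τ) ("T" :: t)
                = w :: lazyApply q qT τ t := by
              simp [lazyApply, hvu]
            by_cases hwT : w = "T"
            · -- the pending symbol fits here: no pop
              subst hwT
              rw [hσ, stepsGo, if_neg (by simp)]
              have hrhs : pairFold (("H" :: τ).zip ("T" :: t)) ("T" :: q) qT
                  = pairFold (τ.zip t) q qT := by
                simp [pairFold]
              rw [hrhs]
              exact ih t q qT ht' hH' hT
            · have hqT' : ∀ x ∈ qT ++ [w], x ≠ "T" := by
                intro x hx
                rcases List.mem_append.mp hx with hx | hx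
                · exact hT x hx
                · simp at hx; subst hx; exact hwT
              rw [hσ, stepsGo, if_pos hwT]
              have hrhs : pairFold (("H" :: τ).zip ("T" :: t)) (w :: q) qT
                  = 1 + pairFold (τ.zip t) q (qT ++ [w]) := by
                simp [pairFold, pushQ, hwT]
              rw [hrhs]
              rcases find_T τ t q qT w ht' hH' hT with ⟨hf, he⟩ | ⟨j, hf, he⟩
              · rw [hf]
                show (1 : Int) + stepsGo (lazyApply q qT τ t) t = _
                rw [← he, ih t q (qT ++ [w]) ht' hH' hqT']
              · rw [hf]
                show (1 : Int) + stepsGo ((lazyApply q qT τ t).set j w) t = _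
                rw [← he, ih t q (qT ++ [w]) ht' hH' hqT']
        · -- v = "T" mismatched, so u = "H": the pop seeks a misplaced "H"
          subst hv
          have huH : u = "H" := by rcases hu with h | h; exacts [h, absurd h.symm hvu]
          subst huH
          cases qT with
          | nil =>
            have hqH' : ∀ x ∈ qH ++ ["T"], x ≠ "H" := by
              intro x hx
              rcases List.mem_append.mp hx with hx | hx
              · exact hH x hx
              · simp at hx; subst hx; simp
            have hσ : lazyApply qH [] ("T" :: τ) ("H" :: t) = "T" :: lazyApply qH [] τ t := by
              simp [lazyApply, hvu]
            rw [hσ, stepsGo, if_pos (by simp)]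
            have hrhs : pairFold (("T" :: τ).zip ("H" :: t)) qH []
                = 1 + pairFold (τ.zip t) (qH ++ ["T"]) [] := by
              simp [pairFold, pushQ]
            rw [hrhs]
            rcases find_H τ t qH [] "T" ht' hH (by simp) with ⟨hf, he⟩ | ⟨j, hf, he⟩
            · rw [hf]
              show (1 : Int) + stepsGo (lazyApply qH [] τ t) t = _
              rw [← he, ih t (qH ++ ["T"]) [] ht' hqH' (by simp)]
            · rw [hf]
              show (1 : Int) + stepsGo ((lazyApply qH [] τ t).set j "T") t = _
              rw [← he, ih t (qH ++ ["T"]) [] ht' hqH' (by simp)]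
          | cons w q =>
            have hw : w ≠ "T" := hT w (by simp)
            have hT' : ∀ x ∈ q, x ≠ "T" := fun x hx => hT x (List.mem_cons_of_mem _ hx)
            have hσ : lazyApply qH (w :: q) ("T" :: τ) ("H" :: t)
                = w :: lazyApply qH q τ t := by
              simp [lazyApply, hvu]
            by_cases hwH : w = "H"
            · subst hwH
              rw [hσ, stepsGo, if_neg (by simp)]
              have hrhs : pairFold (("T" :: τ).zip ("H" :: t)) qH ("H" :: q)
                  = pairFold (τ.zip t) qH q := by
                simp [pairFold]
              rw [hrhs]
              exact ih t qH q ht' hH hT'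
            · have hqH' : ∀ x ∈ qH ++ [w], x ≠ "H" := by
                intro x hx
                rcases List.mem_append.mp hx with hx | hx
                · exact hH x hx
                · simp at hx; subst hx; exact hwH
              rw [hσ, stepsGo, if_pos hwH]
              have hrhs : pairFold (("T" :: τ).zip ("H" :: t)) qH (w :: q)
                  = 1 + pairFold (τ.zip t) (qH ++ [w]) q := by
                simp [pairFold, pushQ, hwH]
              rw [hrhs]
              rcases find_H τ t qH q w ht' hH hT' with ⟨hf, he⟩ | ⟨j, hf, he⟩
              · rw [hf]
                show (1 : Int) + stepsGo (lazyApply qH q τ t) t = _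
                rw [← he, ih t (qH ++ [w]) q ht' hqH' hT']
              · rw [hf]
                show (1 : Int) + stepsGo ((lazyApply qH q τ t).set j w) t = _
                rw [← he, ih t (qH ++ [w]) q ht' hqH' hT']
        · -- v outside the alphabet: always a counted pop, never served
          obtain ⟨hv1, hv2⟩ := hv
          have hσ : lazyApply qH qT (v :: τ) (u :: t) = v :: lazyApply qH qT τ t := by
            simp [lazyApply, hvu, hv1, hv2]
          rw [hσ, stepsGo, if_pos hvu]
          rcases hu with hu | hu <;> subst hu
          · -- u = "H"
            have hqH' : ∀ x ∈ qH ++ [v], x ≠ "H" := by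
              intro x hx
              rcases List.mem_append.mp hx with hx | hx
              · exact hH x hx
              · simp at hx; subst hx; exact hv1
            have hrhs : pairFold ((v :: τ).zip ("H" :: t)) qH qT
                = 1 + pairFold (τ.zip t) (qH ++ [v]) qT := by
              simp [pairFold, pushQ, hv1, hv2]
            rw [hrhs]
            rcases find_H τ t qH qT v ht' hH hT with ⟨hf, he⟩ | ⟨j, hf, he⟩
            · rw [hf]
              show (1 : Int) + stepsGo (lazyApply qH qT τ t) t = _
              rw [← he, ih t (qH ++ [v]) qT ht' hqH' hT]
            · rw [hf]
              show (1 : Int) + stepsGo ((lazyApply qH qT τ t).set j v) t = _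
              rw [← he, ih t (qH ++ [v]) qT ht' hqH' hT]
          · -- u = "T"
            have hqT' : ∀ x ∈ qT ++ [v], x ≠ "T" := by
              intro x hx
              rcases List.mem_append.mp hx with hx | hx
              · exact hT x hx
              · simp at hx; subst hx; exact hv2
            have hrhs : pairFold ((v :: τ).zip ("T" :: t)) qH qT
                = 1 + pairFold (τ.zip t) qH (qT ++ [v]) := by
              simp [pairFold, pushQ, hv1, hv2]
            rw [hrhs]
            rcases find_T τ t qH qT v ht' hH hT with ⟨hf, he⟩ | ⟨j, hf, he⟩
            · rw [hf]
              show (1 : Int) + stepsGo (lazyApply qH qT τ t) t = _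
              rw [← he, ih t qH (qT ++ [v]) ht' hH hqT']
            · rw [hf]
              show (1 : Int) + stepsGo ((lazyApply qH qT τ t).set j v) t = _
              rw [← he, ih t qH (qT ++ [v]) ht' hH hqT']

theorem steps_eq_cost (seq t : List String) (ht : ∀ x ∈ t, x = "H" ∨ x = "T") :
    stepsGo seq t = cost seq t := by
  have h1 : stepsGo seq t = pairFold (seq.zip t) [] [] := by
    conv_lhs => rw [← lazyApply_nil_nil seq t]
    exact stepsGo_eq_pairFold seq t [] [] ht (by simp) (by simp)
  have hinit : ((PySem.Dict.empty.insert "H" ([] : List String)).insert "T" [])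
      = PySem.Dict.mk [("H", []), ("T", [])] := by rfl
  unfold cost
  rw [hinit, cost_eq_pairFold _ _ _ _ (by
    intro p hp
    exact ht p.2 (List.of_mem_zip hp).2)]
  rw [h1]
  omega

theorem bCount_go : ∀ (seq : List String) (acc : Nat),
    seq.foldl (fun acc c => acc + (if c = "H" then 1 else 0)) acc = acc + seq.count "H" := by
  intro seq
  induction seq with
  | nil => intro acc; simp
  | cons c seq ih =>
    intro acc
    by_cases hc : c = "H" <;> simp [ih, hc] ; omega

theorem bCount_eq (seq : List String) : bCount seq = seq.count "H" := by
  unfold bCount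
  rw [bCount_go]
  omega

-- A's option-min accumulation over a list, started at some m
theorem foldl_optmin (f : Nat → Int) : ∀ (l : List Nat) (m : Int),
    l.foldl (fun ans i => match ans with
      | none => some (f i)
      | some m => some (min (f i) m)) (some m)
    = some (l.foldl (fun m i => min m (f i)) m) := by
  intro l
  induction l with
  | nil => intro m; rfl
  | cons x xs ih =>
    intro m
    simp only [List.foldl_cons]
    rw [ih, min_comm (f x) m]

theorem foldl_min_pull : ∀ (xs : List Int) (m x : Int),
    xs.foldl min (min m x) = min m (xs.foldl min x) := by
  intro xs
  induction xs with
  | nil => intro m x; rfl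
  | cons y ys ih =>
    intro m x
    simp only [List.foldl_cons]
    rw [min_assoc, ih]

-- A's fold over range(k+1) started at none equals Python's min of the mapped list
theorem optfold_eq (f : Nat → Int) (k : Nat) :
    (List.range (k+1)).foldl (fun ans i => match ans with
      | none => some (f i)
      | some m => some (min (f i) m)) none
    = some (pyMin ((List.range (k+1)).map f)) := by
  rw [List.range_succ_eq_map]
  simp only [List.foldl_cons, List.map_cons]
  rw [foldl_optmin]
  simp only [pyMin, List.foldl_map]

-- and continued from some m it equals min m (…)
theorem optfold2_eq (f : Nat → Int) (k : Nat) (m : Int) :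
    (List.range (k+1)).foldl (fun ans i => match ans with
      | none => some (f i)
      | some m => some (min (f i) m)) (some m)
    = some (min m (pyMin ((List.range (k+1)).map f))) := by
  rw [foldl_optmin, List.range_succ_eq_map]
  simp only [List.foldl_cons, List.map_cons, pyMin]
  rw [← foldl_min_pull]
  simp only [List.foldl_map]

theorem solve_eq_alt (seq : List String) : solve seq = solve_alt seq := by
  unfold solve solve_alt
  dsimp only
  rw [bCount_eq]
  set hc := seq.count "H" with hhc
  set tc := seq.length - hc with htc
  have hcost1 : ∀ (i : Nat),
      stepsGo seq (List.replicate i "T" ++ List.replicate hc "H" ++ List.replicate (tc - i) "T")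
      = cost seq (List.replicate i "T" ++ List.replicate hc "H" ++ List.replicate (tc - i) "T") := by
    intro i
    apply steps_eq_cost
    intro x hx
    simp only [List.mem_append, List.mem_replicate] at hx
    tauto
  have hcost2 : ∀ (i : Nat),
      stepsGo seq (List.replicate i "H" ++ List.replicate tc "T" ++ List.replicate (hc - i) "H")
      = cost seq (List.replicate i "H" ++ List.replicate tc "T" ++ List.replicate (hc - i) "H") := by
    intro i
    apply steps_eq_cost
    intro x hx
    simp only [List.mem_append, List.mem_replicate] at hx
    tauto
  have h1 : (List.range (tc + 1)).foldl (fun ans i =>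
        let s := List.replicate i "T" ++ List.replicate hc "H" ++ List.replicate (tc - i) "T"
        let c := stepsGo seq s
        match ans with
        | none => some c
        | some m => some (min c m)) (none : Option Int)
      = (List.range (tc + 1)).foldl (fun ans i =>
        match ans with
        | none => some (cost seq (List.replicate i "T" ++ List.replicate hc "H" ++ List.replicate (tc - i) "T"))
        | some m => some (min (cost seq (List.replicate i "T" ++ List.replicate hc "H" ++ List.replicate (tc - i) "T")) m)) (none : Option Int) := by
    apply PySem.List.foldl_congr_mem
    intro acc i _
    dsimp only
    rw [hcost1 i]
  have h2 : ∀ (a : Option Int), (List.range (hc + 1)).foldl (fun ans i =>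
        let s := List.replicate i "H" ++ List.replicate tc "T" ++ List.replicate (hc - i) "H"
        let c := stepsGo seq s
        match ans with
        | none => some c
        | some m => some (min c m)) a
      = (List.range (hc + 1)).foldl (fun ans i =>
        match ans with
        | none => some (cost seq (List.replicate i "H" ++ List.replicate tc "T" ++ List.replicate (hc - i) "H"))
        | some m => some (min (cost seq (List.replicate i "H" ++ List.replicate tc "T" ++ List.replicate (hc - i) "H")) m)) a := by
    intro a
    apply PySem.List.foldl_congr_mem
    intro acc i _
    dsimp only
    rw [hcost2 i]
  rw [h1, h2,
    optfold_eq (fun i => cost seq (List.replicate i "T" ++ List.replicate hc "H" ++ List.replicate (tc - i) "T")) tc,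
    optfold2_eq (fun i => cost seq (List.replicate i "H" ++ List.replicate tc "T" ++ List.replicate (hc - i) "H")) hc]
  rfl

-- ===== VERDICT (by name: the statement is the Claim_ definition above) =====
theorem solve_spec : Claim_equal_solve := by
  intro seq _
  unfold Spec_solve
  exact solve_eq_alt seq
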